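-- pv_equiv track=rewrite | github.com/cudemo/pokerbot | source/components/Players.py | get_index_of_player
-- ===== SOURCE A (Python) =====
-- def get_index_of_player(seats, uuid, only_active_players) -> int:
--     """
--     :param seats: All seats taking place in the poker game
--     :param uuid: Uuid of the player for which the index is calculated
--     :param only_active_players: Controls if folded players are considered to calculate the index
--     :return: Index of the given player
--     """
--     index_of_own_player = 0
--     for seat in seats:
--         if seat['uuid'] == uuid:
--             return index_of_own_player
--
--         if only_active_players and seat['state'] == 'folded':
--             continue
--
--         index_of_own_player += 1
--
--     return index_of_own_player
-- ===== SOURCE B (Python) =====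
-- def get_index_of_player(seats, uuid, only_active_players) -> int:
--     # Different decomposition: find the matching seat's position first,
--     # then compute the index from that prefix alone.
--     prefix = seats
--     for i, seat in enumerate(seats):
--         if seat['uuid'] == uuid:
--             prefix = seats[:i]
--             break
--     if not only_active_players:
--         return len(prefix)
--     return sum(1 for s in prefix if s['state'] != 'folded')
-- ===== Notes on version B (the rewrite author's own statement) =====
-- stated objective: alternative
-- what changed: Replaces A's single fused accumulate-and-return loop by a find-first-match pass (enumerate + break) followed by a separate counting pass (len or a sum over the prefix), so the index is derived from the prefix rather than maintained as loop state.
import Mathlib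
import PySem

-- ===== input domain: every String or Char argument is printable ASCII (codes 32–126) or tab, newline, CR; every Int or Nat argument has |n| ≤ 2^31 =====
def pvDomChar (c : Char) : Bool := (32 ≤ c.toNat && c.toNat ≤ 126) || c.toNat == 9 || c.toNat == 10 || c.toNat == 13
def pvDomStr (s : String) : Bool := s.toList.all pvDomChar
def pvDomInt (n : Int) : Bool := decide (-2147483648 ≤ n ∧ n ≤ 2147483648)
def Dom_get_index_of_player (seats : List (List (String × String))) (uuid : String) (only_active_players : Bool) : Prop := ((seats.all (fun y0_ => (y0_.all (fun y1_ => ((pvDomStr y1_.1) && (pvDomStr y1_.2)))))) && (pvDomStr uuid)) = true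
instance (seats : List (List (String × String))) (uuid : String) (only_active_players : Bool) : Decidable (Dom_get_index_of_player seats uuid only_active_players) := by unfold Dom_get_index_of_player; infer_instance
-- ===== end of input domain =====

-- ===== PORT A =====
-- B changes the decomposition only (find-match pass, then a counting pass); same O(n) cost.
-- first-match lookup in an association list (Python dict access seat[k]; none = KeyError)
def pvLookup (d : List (String × String)) (k : String) : Option String :=
  (d.find? (fun p => p.1 == k)).map (·.2)

-- A's fused loop: accumulate the index, return it at the first uuid match
def pvGoA (uuid : String) (only_active_players : Bool) :
    List (List (String × String)) → Int → Int
  | [], acc => acc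
  | seat :: rest, acc =>
    if pvLookup seat "uuid" = some uuid then acc
    else if only_active_players && (pvLookup seat "state" == some "folded") then
      pvGoA uuid only_active_players rest acc
    else
      pvGoA uuid only_active_players rest (acc + 1)

def get_index_of_player (seats : List (List (String × String))) (uuid : String) (only_active_players : Bool) : Int :=
  pvGoA uuid only_active_players seats 0

-- ===== PORT B =====
-- enumerate-and-break: index of the first seat whose 'uuid' matches
def pvFindIdxB (uuid : String) : List (List (String × String)) → Option Nat
  | [] => none
  | seat :: rest =>
    if pvLookup seat "uuid" = some uuid then some 0
    else (pvFindIdxB uuid rest).map (· + 1)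

def get_index_of_player_alt (seats : List (List (String × String))) (uuid : String) (only_active_players : Bool) : Int :=
  let pref :=
    match pvFindIdxB uuid seats with
    | some i => seats.take i
    | none => seats
  if !only_active_players then (pref.length : Int)
  else pref.foldl (fun acc s => if pvLookup s "state" != some "folded" then acc + 1 else acc) 0

-- ===== PRECONDITION & SPEC =====
-- Pre_: exactly the inputs on which Python A returns (no KeyError): every seat strictly
-- before the first uuid match (or every seat, if none matches) has a 'uuid' key and,
-- when only_active_players, a 'state' key.
def Pre_get_index_of_player (seats : List (List (String × String))) (uuid : String) (only_active_players : Bool) : Prop :=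
  ((seats.takeWhile (fun s => !(pvLookup s "uuid" == some uuid))).all
    (fun s => (pvLookup s "uuid").isSome &&
      (!only_active_players || (pvLookup s "state").isSome))) = true

instance (seats : List (List (String × String))) (uuid : String) (only_active_players : Bool) : Decidable (Pre_get_index_of_player seats uuid only_active_players) := by unfold Pre_get_index_of_player; infer_instance

def pvWitness_get_index_of_player : (List (List (String × String))) × String × Bool :=
  ([[("uuid", "a"), ("state", "folded")], [("uuid", "b"), ("state", "active")]], "b", true)

def Spec_get_index_of_player (seats : List (List (String × String))) (uuid : String) (only_active_players : Bool) (out : Int) : Prop := out = get_index_of_player_alt seats uuid only_active_players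
instance (seats : List (List (String × String))) (uuid : String) (only_active_players : Bool) (out : Int) : Decidable (Spec_get_index_of_player seats uuid only_active_players out) := by unfold Spec_get_index_of_player; infer_instance

-- ===== CLAIM (what is proved, stated in full; the proofs are below) =====
def Claim_equal_get_index_of_player : Prop := ∀ (seats : List (List (String × String))) (uuid : String) (only_active_players : Bool), Dom_get_index_of_player seats uuid only_active_players → Pre_get_index_of_player seats uuid only_active_players → Spec_get_index_of_player seats uuid only_active_players (get_index_of_player seats uuid only_active_players)

-- ===== LEMMAS AND PROOFS =====

-- the counting fold's initial accumulator factors out additively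
theorem pvCount_init (l : List (List (String × String))) (a : Int) :
    l.foldl (fun acc s => if pvLookup s "state" != some "folded" then acc + 1 else acc) a
      = a + l.foldl (fun acc s => if pvLookup s "state" != some "folded" then acc + 1 else acc) 0 := by
  induction l generalizing a with
  | nil => simp
  | cons x xs ih =>
    simp only [List.foldl_cons]
    rw [ih, ih (if pvLookup x "state" != some "folded" then 0 + 1 else 0)]
    by_cases hx : pvLookup x "state" != some "folded" <;> simp [hx] <;> ring

-- B's head-step: when the head seat does not match, B's value on (s :: rest) is the
-- head's contribution plus B's value on rest.
theorem pvAlt_cons_nomatch (s : List (String × String)) (rest : List (List (String × String)))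
    (uuid : String) (o : Bool) (h : ¬ pvLookup s "uuid" = some uuid) :
    get_index_of_player_alt (s :: rest) uuid o =
      (if o && (pvLookup s "state" == some "folded") then 0 else 1) +
        get_index_of_player_alt rest uuid o := by
  unfold get_index_of_player_alt
  simp only [pvFindIdxB, if_neg h]
  cases hf : pvFindIdxB uuid rest with
  | none =>
    simp only [Option.map_none]
    cases o with
    | false =>
      simp only [Bool.not_false, Bool.false_and, Bool.false_eq_true, if_false, List.length_cons]
      push_cast; ring
    | true =>
      simp only [Bool.not_true, Bool.false_eq_true, if_false, List.foldl_cons, Bool.true_and]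
      rw [pvCount_init]
      by_cases hs : pvLookup s "state" == some "folded"
      · have heq : pvLookup s "state" = some "folded" := by simpa using hs
        have : (pvLookup s "state" != some "folded") = false := by simp [bne, heq]
        simp [heq]
      · have hs' : (pvLookup s "state" == some "folded") = false := by simpa using hs
        have : (pvLookup s "state" != some "folded") = true := by simp [bne, hs']
        simp [hs', this]
  | some i =>
    simp only [Option.map_some, List.take_succ_cons]
    cases o with
    | false =>
      simp only [Bool.not_false, Bool.false_and, Bool.false_eq_true, if_false, List.length_cons]
      push_cast; ring
    | true =>
      simp only [Bool.not_true, Bool.false_eq_true, if_false, List.foldl_cons, Bool.true_and]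
      rw [pvCount_init]
      by_cases hs : pvLookup s "state" == some "folded"
      · have heq : pvLookup s "state" = some "folded" := by simpa using hs
        have : (pvLookup s "state" != some "folded") = false := by simp [bne, heq]
        simp [heq]
      · have hs' : (pvLookup s "state" == some "folded") = false := by simpa using hs
        have : (pvLookup s "state" != some "folded") = true := by simp [bne, hs']
        simp [hs', this]

theorem pvMain (uuid : String) (o : Bool) :
    ∀ (seats : List (List (String × String))) (acc : Int),
      Pre_get_index_of_player seats uuid o →
      pvGoA uuid o seats acc = acc + get_index_of_player_alt seats uuid o := by
  intro seats
  induction seats with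
  | nil => intro acc _; simp [pvGoA, get_index_of_player_alt, pvFindIdxB]
  | cons s rest ih =>
    intro acc hpre
    by_cases hm : pvLookup s "uuid" = some uuid
    · simp [pvGoA, hm, get_index_of_player_alt, pvFindIdxB]
    · have hm' : (pvLookup s "uuid" == some uuid) = false := by simpa using hm
      unfold Pre_get_index_of_player at hpre
      rw [show (s :: rest).takeWhile (fun s => !(pvLookup s "uuid" == some uuid))
            = s :: rest.takeWhile (fun s => !(pvLookup s "uuid" == some uuid)) by
          simp [List.takeWhile, hm']] at hpre
      simp only [List.all_cons, Bool.and_eq_true] at hpre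
      have hpreR : Pre_get_index_of_player rest uuid o := hpre.2
      rw [pvAlt_cons_nomatch s rest uuid o hm]
      unfold pvGoA
      rw [if_neg hm]
      by_cases hs : (o && (pvLookup s "state" == some "folded")) = true
      · rw [if_pos hs, ih acc hpreR, if_pos hs]; ring
      · rw [if_neg hs, ih (acc + 1) hpreR, if_neg hs]; ring

-- ===== VERDICT (by name: the statement is the Claim_ definition above) =====
theorem get_index_of_player_spec : Claim_equal_get_index_of_player := by
  intro seats uuid o _ hpre
  unfold Spec_get_index_of_player get_index_of_player
  simpa using pvMain uuid o seats 0 hpre
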